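-- pv_equiv track=rewrite | github.com/Daviderose/Whiteboard-excercises | RemoveVowelEven/RemoveVowelEven.py | remove_vowel_even
-- ===== SOURCE A (Python) =====
-- def remove_vowel_even(str):
--
--     voweless_str = ''
--     final_str = ''
--     vowels = ['a','e','i','o','u']
--     for char in str:
--         if char not in vowels:
--             voweless_str += char
--     for i in range(len(voweless_str)):
--         if i % 2 == 0:
--             final_str += voweless_str[i]
--     return final_str
-- ===== SOURCE B (Python) =====
-- def remove_vowel_even(str):
--     # single fused pass: parity counter over non-vowel characters
--     out = []
--     k = 0
--     for char in str:
--         if char not in ('a', 'e', 'i', 'o', 'u'):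
--             if k % 2 == 0:
--                 out.append(char)
--             k += 1
--     return ''.join(out)
-- ===== Notes on version B (the rewrite author's own statement) =====
-- stated objective: simpler
-- what changed: B fuses A's two passes (build a vowel-free string, then index-scan it keeping even positions) into one loop over the input with a parity counter of non-vowel characters, eliminating the intermediate string and the index loop.
import Mathlib
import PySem

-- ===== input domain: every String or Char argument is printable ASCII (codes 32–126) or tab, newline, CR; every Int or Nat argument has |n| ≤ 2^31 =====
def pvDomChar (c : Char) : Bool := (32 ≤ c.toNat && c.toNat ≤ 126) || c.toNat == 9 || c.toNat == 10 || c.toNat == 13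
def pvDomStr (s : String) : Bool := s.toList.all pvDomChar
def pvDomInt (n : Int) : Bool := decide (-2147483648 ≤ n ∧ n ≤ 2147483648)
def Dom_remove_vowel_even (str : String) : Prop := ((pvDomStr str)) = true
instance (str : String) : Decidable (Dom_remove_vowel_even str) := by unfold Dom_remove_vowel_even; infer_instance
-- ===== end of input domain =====

-- B fuses A's two passes (vowel-free string, then even-index scan) into one loop with a
-- parity counter of non-vowel characters; objective: simpler (no intermediate string).

-- ===== PORT A =====
-- A: first loop builds the vowel-free string, second loop keeps even indices.
def remove_vowel_even (str : String) : String :=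
  let vowels : List Char := ['a', 'e', 'i', 'o', 'u']
  let voweless_str : List Char :=
    str.toList.foldl (fun acc char => if vowels.contains char then acc else acc ++ [char]) []
  let final_str : List Char :=
    (List.range voweless_str.length).foldl
      (fun acc i => if i % 2 = 0 then acc ++ [voweless_str.getD i ' '] else acc) []
  -- getD's default is never used: i < length throughout (total-making guard only)
  String.mk final_str

-- ===== PORT B =====
def remove_vowel_even_alt (str : String) : String :=
  let step : (List Char × Nat) → Char → (List Char × Nat) := fun s char =>
    if (['a', 'e', 'i', 'o', 'u'] : List Char).contains char then s
    else ((if s.2 % 2 = 0 then s.1 ++ [char] else s.1), s.2 + 1)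
  String.mk (str.toList.foldl step ([], 0)).1

-- ===== PRECONDITION & SPEC =====
def Spec_remove_vowel_even (str : String) (out : String) : Prop := out = remove_vowel_even_alt str
instance (str : String) (out : String) : Decidable (Spec_remove_vowel_even str out) := by unfold Spec_remove_vowel_even; infer_instance

-- ===== CLAIM (what is proved, stated in full; the proofs are below) =====
def Claim_equal_remove_vowel_even : Prop := ∀ (str : String), Dom_remove_vowel_even str → Spec_remove_vowel_even str (remove_vowel_even str)

-- ===== LEMMAS AND PROOFS =====

-- characters of l at even positions, starting position counter at k
def pvSel (k : Nat) (l : List Char) : List Char :=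
  match l with
  | [] => []
  | c :: r => (if k % 2 = 0 then [c] else []) ++ pvSel (k + 1) r

theorem pv_filter_fold (p : Char → Bool) (cs : List Char) (acc : List Char) :
    cs.foldl (fun acc char => if p char then acc else acc ++ [char]) acc
      = acc ++ cs.filter (fun c => !p c) := by
  induction cs generalizing acc with
  | nil => simp
  | cons c r ih =>
    simp only [List.foldl_cons, List.filter_cons]
    cases h : p c
    · simp only [Bool.not_false, if_true, ih]
      simp
    · simp [ih]
theorem pv_range_fold (l : List Char) (m k : Nat) (acc : List Char) (hk : k + m = l.length) :
    (List.range' k m).foldl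
        (fun acc i => if i % 2 = 0 then acc ++ [l.getD i ' '] else acc) acc
      = acc ++ pvSel k (l.drop k) := by
  induction m generalizing k acc with
  | zero =>
    have : l.drop k = [] := List.drop_of_length_le (by omega)
    simp [this, pvSel]
  | succ m ih =>
    have hlt : k < l.length := by omega
    have hdrop : l.drop k = l[k] :: l.drop (k + 1) := List.drop_eq_getElem_cons hlt
    rw [List.range'_succ, List.foldl_cons, ih (k + 1) _ (by omega), hdrop]
    by_cases hp : k % 2 = 0 <;> simp [pvSel, hp, List.getElem?_eq_getElem hlt]

theorem pv_alt_fold (p : Char → Bool) (cs : List Char) (acc : List Char) (k : Nat) :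
    (cs.foldl (fun (s : List Char × Nat) char =>
        if p char then s
        else ((if s.2 % 2 = 0 then s.1 ++ [char] else s.1), s.2 + 1)) (acc, k)).1
      = acc ++ pvSel k (cs.filter (fun c => !p c)) := by
  induction cs generalizing acc k with
  | nil => simp [pvSel]
  | cons c r ih =>
    simp only [List.foldl_cons, List.filter_cons]
    cases h : p c
    · by_cases hp : k % 2 = 0 <;> simp [hp, ih, pvSel]
    · simp [ih]
-- ===== VERDICT (by name: the statement is the Claim_ definition above) =====
theorem remove_vowel_even_spec : Claim_equal_remove_vowel_even := by
  intro str _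
  unfold Spec_remove_vowel_even remove_vowel_even remove_vowel_even_alt
  simp only
  rw [pv_filter_fold (fun char => (['a', 'e', 'i', 'o', 'u'] : List Char).contains char),
      List.nil_append, List.range_eq_range',
      pv_range_fold _ _ 0 [] (by omega), List.drop_zero,
      pv_alt_fold (fun char => (['a', 'e', 'i', 'o', 'u'] : List Char).contains char),
      List.nil_append]
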